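-- pv_equiv track=rewrite | github.com/SepuNelson/UTFSM-Academico | IWI131 Introducción a la Programación/Tareas/Tarea 8/tarea 8.py | puntaje_amigo
-- ===== SOURCE A (Python) =====
-- def puntaje_amigo(amigo, caracteristicas):
--     nombre,caracs = amigo
--     i1 = 0
--     total = 0
--     while i1 < len(caracs):
--         c = caracs[i1]
--         #Conteo
--         i = 0
--         while i < len(caracteristicas):
--             carac, canti = caracteristicas[i]
--             if c == carac:
--                 total += canti
--             i += 1
--         i1 += 1
--     return total
-- ===== SOURCE B (Python) =====
-- def puntaje_amigo(amigo, caracteristicas):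
--     nombre, caracs = amigo
--     sumas = {}
--     for carac, canti in caracteristicas:
--         sumas[carac] = sumas.get(carac, 0) + canti
--     total = 0
--     for c in caracs:
--         total += sumas.get(c, 0)
--     return total
-- ===== Notes on version B (the rewrite author's own statement) =====
-- stated objective: faster
-- what changed: Replaced the nested scan (rescanning all caracteristicas for every friend characteristic) by a single pass building a dict of summed quantities per characteristic followed by one lookup per friend characteristic.
import Mathlib
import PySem

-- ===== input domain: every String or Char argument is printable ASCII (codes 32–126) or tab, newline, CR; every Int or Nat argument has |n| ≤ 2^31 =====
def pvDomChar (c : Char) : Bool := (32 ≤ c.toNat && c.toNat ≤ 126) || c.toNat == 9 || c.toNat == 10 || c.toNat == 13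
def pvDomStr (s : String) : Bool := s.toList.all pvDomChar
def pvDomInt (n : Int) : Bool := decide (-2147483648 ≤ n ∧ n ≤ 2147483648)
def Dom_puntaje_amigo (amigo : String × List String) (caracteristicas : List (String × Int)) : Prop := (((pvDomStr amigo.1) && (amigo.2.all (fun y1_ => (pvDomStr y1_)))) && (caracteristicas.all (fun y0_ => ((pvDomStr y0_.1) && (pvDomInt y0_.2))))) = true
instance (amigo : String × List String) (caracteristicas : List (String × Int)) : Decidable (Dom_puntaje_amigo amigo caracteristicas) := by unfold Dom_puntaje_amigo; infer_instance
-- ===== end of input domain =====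

-- B replaces A's nested scan by one dict-building pass plus one lookup per friend characteristic (objective: faster, O(n*m) → O(n+m)).

-- ===== PORT A =====
-- while i1 < len(caracs): nested while i < len(caracteristicas): if c == carac: total += canti
def puntaje_amigo (amigo : String × List String) (caracteristicas : List (String × Int)) : Int :=
  amigo.2.foldl (fun total c =>
    caracteristicas.foldl (fun t p => if c == p.1 then t + p.2 else t) total) 0

-- ===== PORT B =====
-- sumas[carac] = sumas.get(carac, 0) + canti in one pass, then total += sumas.get(c, 0)
def puntaje_amigo_alt (amigo : String × List String) (caracteristicas : List (String × Int)) : Int :=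
  let sumas := caracteristicas.foldl (fun d p => d.insert p.1 (d.getD p.1 0 + p.2)) PySem.Dict.empty
  amigo.2.foldl (fun total c => total + sumas.getD c 0) 0

-- ===== PRECONDITION & SPEC =====
def Spec_puntaje_amigo (amigo : String × List String) (caracteristicas : List (String × Int)) (out : Int) : Prop := out = puntaje_amigo_alt amigo caracteristicas
instance (amigo : String × List String) (caracteristicas : List (String × Int)) (out : Int) : Decidable (Spec_puntaje_amigo amigo caracteristicas out) := by unfold Spec_puntaje_amigo; infer_instance

-- ===== CLAIM (what is proved, stated in full; the proofs are below) =====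
def Claim_equal_puntaje_amigo : Prop := ∀ (amigo : String × List String) (caracteristicas : List (String × Int)), Dom_puntaje_amigo amigo caracteristicas → Spec_puntaje_amigo amigo caracteristicas (puntaje_amigo amigo caracteristicas)

-- ===== LEMMAS AND PROOFS =====

-- A's inner loop only ever adds to its accumulator: shift the start out.
theorem inner_shift (cs : List (String × Int)) (c : String) (t0 : Int) :
    cs.foldl (fun t p => if c == p.1 then t + p.2 else t) t0
      = t0 + cs.foldl (fun t p => if c == p.1 then t + p.2 else t) 0 := by
  induction cs generalizing t0 with
  | nil => simp
  | cons p rest ih =>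
    simp only [List.foldl_cons]
    rw [ih, ih (if c == p.1 then 0 + p.2 else 0)]
    split <;> ring

-- B's dict after the building loop holds exactly A's inner-loop sum for every key.
theorem dict_getD (cs : List (String × Int)) (d : PySem.Dict String Int) (c : String) :
    (cs.foldl (fun d p => d.insert p.1 (d.getD p.1 0 + p.2)) d).getD c 0
      = d.getD c 0 + cs.foldl (fun t p => if c == p.1 then t + p.2 else t) 0 := by
  induction cs generalizing d with
  | nil => simp
  | cons p rest ih =>
    simp only [List.foldl_cons]
    rw [ih, PySem.Dict.getD_insert,
      inner_shift rest c (if (c == p.1) = true then 0 + p.2 else 0)]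
    by_cases h : c = p.1 <;> simp [h] <;> ring

theorem puntaje_amigo_eq_alt (amigo : String × List String) (cs : List (String × Int)) :
    puntaje_amigo amigo cs = puntaje_amigo_alt amigo cs := by
  unfold puntaje_amigo puntaje_amigo_alt
  have hf : (fun total c => cs.foldl (fun t p => if c == p.1 then t + p.2 else t) total)
      = (fun total c => total +
          (cs.foldl (fun d p => d.insert p.1 (d.getD p.1 0 + p.2)) PySem.Dict.empty).getD c 0) := by
    funext total c
    rw [dict_getD, inner_shift, PySem.Dict.getD_empty]
    ring
  rw [hf]

-- ===== VERDICT (by name: the statement is the Claim_ definition above) =====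
theorem puntaje_amigo_spec : Claim_equal_puntaje_amigo := by
  intro amigo cs _
  exact puntaje_amigo_eq_alt amigo cs
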